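-- pv_equiv track=rewrite | github.com/YoungKwonJo/Analysis | CATTools/plots/mcsample_cfi.py | mAND2
-- ===== SOURCE A (Python) =====
-- def mAND(aaa,bbb):
--   return "(" +aaa+ " && "+bbb+")"
--
-- def mAND2(aaa):
--   bbb=""
--   for i,ii in enumerate(aaa):
--     if i==0 :
--       bbb+= ii
--     else :
--       bbb=mAND(ii,bbb)
--   return bbb
-- ===== SOURCE B (Python) =====
-- def mAND2(aaa):
--     n = len(aaa)
--     if n == 0:
--         return ""
--     return "".join("(" + t + " && " for t in reversed(aaa[1:])) + aaa[0] + ")" * (n - 1)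
-- ===== Notes on version B (the rewrite author's own statement) =====
-- stated objective: faster
-- what changed: Replaces the repeated wrap-the-accumulator loop (quadratic string copying) with a single join of opening segments over the reversed tail, the head, and (n-1) closing parens.
import Mathlib
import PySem

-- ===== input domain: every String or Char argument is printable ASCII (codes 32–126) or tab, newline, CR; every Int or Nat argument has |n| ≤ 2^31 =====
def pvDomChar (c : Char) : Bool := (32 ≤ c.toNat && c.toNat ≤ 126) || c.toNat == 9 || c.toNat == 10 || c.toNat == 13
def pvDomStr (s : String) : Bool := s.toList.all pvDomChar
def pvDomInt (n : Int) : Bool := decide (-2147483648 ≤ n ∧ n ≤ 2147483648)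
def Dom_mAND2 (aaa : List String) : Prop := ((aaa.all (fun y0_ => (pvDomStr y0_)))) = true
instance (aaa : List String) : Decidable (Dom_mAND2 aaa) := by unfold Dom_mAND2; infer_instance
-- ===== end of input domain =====

-- B builds the right-nested "&&" string in one pass (join of opening segments over the
-- reversed tail, then the head, then n-1 closing parens) instead of A's repeated
-- wrapping of an accumulator; same return value on every list.

-- ===== PORT A =====
def mANDh (aaa bbb : String) : String := "(" ++ aaa ++ " && " ++ bbb ++ ")"

def mAND2 (aaa : List String) : String :=
  (PySem.List.enumerate aaa 0).foldl
    (fun bbb p => if p.1 = 0 then bbb ++ p.2 else mANDh p.2 bbb) ""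

-- ===== PORT B =====
def mAND2_alt (aaa : List String) : String :=
  match aaa with
  | [] => ""
  | x :: xs =>
      String.join (xs.reverse.map (fun t => "(" ++ t ++ " && ")) ++ x
        ++ String.join (List.replicate xs.length ")")

-- ===== PRECONDITION & SPEC =====
def Spec_mAND2 (aaa : List String) (out : String) : Prop := out = mAND2_alt aaa
instance (aaa : List String) (out : String) : Decidable (Spec_mAND2 aaa out) := by unfold Spec_mAND2; infer_instance

-- ===== CLAIM (what is proved, stated in full; the proofs are below) =====
def Claim_equal_mAND2 : Prop := ∀ (aaa : List String), Dom_mAND2 aaa → Spec_mAND2 aaa (mAND2 aaa)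

-- ===== LEMMAS AND PROOFS =====

-- From index 1 on, A's loop always takes the else-branch (indices are positive).
lemma mAND2_enum_pos (xs : List String) (s : Int) (hs : 1 ≤ s) (acc : String) :
    (PySem.List.enumerate xs s).foldl
      (fun bbb p => if p.1 = 0 then bbb ++ p.2 else mANDh p.2 bbb) acc
    = xs.foldl (fun bbb ii => mANDh ii bbb) acc := by
  induction xs generalizing s acc with
  | nil => simp [PySem.List.enumerate_nil]
  | cons y ys ih =>
      rw [PySem.List.enumerate_cons]
      simp only [List.foldl_cons]
      rw [if_neg (by omega)]
      exact ih (s + 1) (by omega) _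

lemma fold_toList (l : List String) (acc : String) :
    (List.foldl (fun r s => r ++ s) acc l).toList = acc.toList ++ (l.map String.toList).flatten := by
  induction l generalizing acc with
  | nil => simp
  | cons y ys ih => simp [List.foldl_cons, ih]

-- A's wrapping loop equals B's join form.
lemma mAND2_loop_eq (xs : List String) (acc : String) :
    xs.foldl (fun bbb ii => mANDh ii bbb) acc
    = String.join (xs.reverse.map (fun t => "(" ++ t ++ " && ")) ++ acc
        ++ String.join (List.replicate xs.length ")") := by
  induction xs generalizing acc with
  | nil => simp [String.join]
  | cons y ys ih =>
      simp only [List.foldl_cons, List.reverse_cons, List.map_append, List.map_cons,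
        List.map_nil, List.length_cons]
      rw [ih]
      rw [List.replicate_succ']
      apply String.ext
      simp [String.join, mANDh, fold_toList]
      rw [← List.replicate_succ, List.replicate_succ']

theorem mAND2_eq (aaa : List String) : mAND2 aaa = mAND2_alt aaa := by
  cases aaa with
  | nil => rfl
  | cons x xs =>
      unfold mAND2 mAND2_alt
      rw [PySem.List.enumerate_cons]
      simp only [List.foldl_cons, reduceIte]
      rw [mAND2_enum_pos xs (0 + 1) (by omega)]
      rw [mAND2_loop_eq]
      simp

-- ===== VERDICT (by name: the statement is the Claim_ definition above) =====
theorem mAND2_spec : Claim_equal_mAND2 := by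
  intro aaa _
  exact mAND2_eq aaa
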